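-- pv_equiv track=rewrite | github.com/pypi-data/pypi-mirror-138 | packages/csc/csc-22.2.0-py3-none-any.whl/csc/_utils.py | _iter_module_parents
-- ===== SOURCE A (Python) =====
-- def _iter_module_parents(name):
--     start = 0
--
--     while True:
--         try:
--             idx = name.index(".", start)
--
--         except ValueError:
--             break
--
--         yield name[:idx]
--         start = idx + 1
-- ===== SOURCE B (Python) =====
-- def _iter_module_parents(name):
--     parts = name.split(".")
--     for i in range(1, len(parts)):
--         yield ".".join(parts[:i])
-- ===== Notes on version B (the rewrite author's own statement) =====
-- stated objective: alternative
-- what changed: Replaced the running-index scan (repeated name.index with ValueError-break) by tokenize-then-reassemble: split the name at the dots once and yield the dot-join of each proper prefix of the part list.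
import Mathlib
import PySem

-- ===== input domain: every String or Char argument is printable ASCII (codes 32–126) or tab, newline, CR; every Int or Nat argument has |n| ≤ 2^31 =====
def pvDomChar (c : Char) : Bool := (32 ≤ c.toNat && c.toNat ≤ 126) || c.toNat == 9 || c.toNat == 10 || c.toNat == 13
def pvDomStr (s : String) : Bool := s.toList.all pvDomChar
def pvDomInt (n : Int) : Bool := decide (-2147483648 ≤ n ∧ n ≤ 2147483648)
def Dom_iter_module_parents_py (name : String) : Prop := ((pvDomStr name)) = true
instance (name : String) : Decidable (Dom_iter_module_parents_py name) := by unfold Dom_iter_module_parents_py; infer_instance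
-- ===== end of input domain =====

-- B re-implements the running-index scan-for-dot loop as split('.') followed by re-joining the
-- prefixes of the part list ('alternative' objective: different decomposition, not faster).
-- Both versions are generators in Python; we model the full yielded sequence as a List String.

-- ===== PORT A =====
-- A's while-loop: 'idx = name.index(".", start)' raises ValueError exactly when findFrom = -1
-- (the 'except: break' branch); 'name[:idx]' with idx ≥ 0 is 'take idx'. The loop is ported with
-- fuel = length + 1, enough because start strictly increases and stays ≤ length.
def aGo (cs : List Char) (fuel : Nat) (start : Nat) : List (List Char) :=
  match fuel with
  | 0 => []
  | fuel + 1 =>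
    let idx := PySem.Chars.findFrom cs ['.'] (start : Int) none
    if idx = -1 then []
    else cs.take idx.toNat :: aGo cs fuel (idx.toNat + 1)

def iter_module_parents_py (name : String) : List String :=
  (aGo name.toList (name.toList.length + 1) 0).map String.ofList

-- ===== PORT B =====
-- Source B: parts = name.split('.'); for i in range(1, len(parts)): yield '.'.join(parts[:i])
-- (parts[:i] with i ≥ 0 is 'take i.toNat').
def iter_module_parents_py_alt (name : String) : List String :=
  let parts := PySem.Chars.splitOn name.toList ['.']
  (PySem.List.pyRange 1 (parts.length : Int) 1).map
    (fun i => String.ofList (PySem.Chars.join ['.'] (parts.take i.toNat)))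

-- ===== PRECONDITION & SPEC =====
def Spec_iter_module_parents_py (name : String) (out : List String) : Prop := out = iter_module_parents_py_alt name
instance (name : String) (out : List String) : Decidable (Spec_iter_module_parents_py name out) := by unfold Spec_iter_module_parents_py; infer_instance

-- ===== CLAIM (what is proved, stated in full; the proofs are below) =====
def Claim_equal_iter_module_parents_py : Prop := ∀ (name : String), Dom_iter_module_parents_py name → Spec_iter_module_parents_py name (iter_module_parents_py name)

-- ===== LEMMAS AND PROOFS =====

lemma go_zero (l cur : List Char) (acc : List (List Char)) :
    PySem.Chars.splitOn.go ['.'] 0 l cur acc = ((cur.reverse ++ l) :: acc).reverse := by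
  simp [PySem.Chars.splitOn.go]

lemma go_nil (fuel : Nat) (cur : List Char) (acc : List (List Char)) :
    PySem.Chars.splitOn.go ['.'] (fuel+1) [] cur acc = (cur.reverse :: acc).reverse := by
  simp [PySem.Chars.splitOn.go]

lemma go_cons (fuel : Nat) (c : Char) (rest cur : List Char) (acc : List (List Char)) :
    PySem.Chars.splitOn.go ['.'] (fuel+1) (c :: rest) cur acc =
      if c = '.' then PySem.Chars.splitOn.go ['.'] fuel rest [] (cur.reverse :: acc)
      else PySem.Chars.splitOn.go ['.'] fuel rest (c :: cur) acc := by
  by_cases h : c = '.'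
  · simp [PySem.Chars.splitOn.go, List.isPrefixOf, h]
  · simp [PySem.Chars.splitOn.go, List.isPrefixOf, h]
    exact fun h' => absurd h'.symm h

lemma go_acc (fuel : Nat) : ∀ (l cur : List Char) (acc : List (List Char)),
    PySem.Chars.splitOn.go ['.'] fuel l cur acc
      = acc.reverse ++ PySem.Chars.splitOn.go ['.'] fuel l cur [] := by
  induction fuel with
  | zero => intro l cur acc; simp [go_zero]
  | succ fuel ih =>
    intro l cur acc
    cases l with
    | nil => simp [go_nil]
    | cons c rest =>
      rw [go_cons, go_cons]
      by_cases h : c = '.'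
      · simp only [h, if_true]
        rw [ih rest [] (cur.reverse :: acc), ih rest [] [cur.reverse]]
        simp
      · simp only [if_neg h]
        exact ih rest (c :: cur) acc

lemma go_nodot (fuel : Nat) : ∀ (l cur : List Char) (acc : List (List Char)), '.' ∉ l →
    PySem.Chars.splitOn.go ['.'] fuel l cur acc = acc.reverse ++ [cur.reverse ++ l] := by
  induction fuel with
  | zero => intro l cur acc _; simp [go_zero]
  | succ fuel ih =>
    intro l cur acc h
    cases l with
    | nil => simp [go_nil]
    | cons c rest =>
      have hc : c ≠ '.' := fun hc => h (hc ▸ List.mem_cons_self)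
      rw [go_cons, if_neg hc, ih rest (c :: cur) acc (fun hm => h (List.mem_cons_of_mem _ hm))]
      simp

lemma go_dot (p : List Char) : ∀ (fuel : Nat) (rest cur : List Char) (acc : List (List Char)),
    '.' ∉ p →
    PySem.Chars.splitOn.go ['.'] (p.length + 1 + fuel) (p ++ '.' :: rest) cur acc
      = PySem.Chars.splitOn.go ['.'] fuel rest [] ((cur.reverse ++ p) :: acc) := by
  induction p with
  | nil =>
    intro fuel rest cur acc _
    have : ([] : List Char).length + 1 + fuel = fuel + 1 := by simp [Nat.add_comm]
    rw [this]
    simp [go_cons]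
  | cons c p ih =>
    intro fuel rest cur acc h
    have hc : c ≠ '.' := fun hc => h (hc ▸ List.mem_cons_self)
    have : (c :: p).length + 1 + fuel = (p.length + 1 + fuel) + 1 := by simp; omega
    rw [this]
    have := go_cons (p.length + 1 + fuel) c (p ++ '.' :: rest) cur acc
    rw [List.cons_append, this, if_neg hc,
      ih fuel rest (c :: cur) acc (fun hm => h (List.mem_cons_of_mem _ hm))]
    simp

lemma go_ne_nil (fuel : Nat) : ∀ (l cur : List Char) (acc : List (List Char)),
    PySem.Chars.splitOn.go ['.'] fuel l cur acc ≠ [] := by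
  induction fuel with
  | zero => intro l cur acc; simp [go_zero]
  | succ fuel ih =>
    intro l cur acc
    cases l with
    | nil => simp [go_nil]
    | cons c rest =>
      rw [go_cons]
      by_cases h : c = '.' <;> simp [h, ih]

lemma splitOn_nodot (cs : List Char) (h : '.' ∉ cs) :
    PySem.Chars.splitOn cs ['.'] = [cs] := by
  unfold PySem.Chars.splitOn
  rw [go_nodot _ _ _ _ h]; simp

lemma splitOn_dot (p rest : List Char) (h : '.' ∉ p) :
    PySem.Chars.splitOn (p ++ '.' :: rest) ['.'] = p :: PySem.Chars.splitOn rest ['.'] := by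
  unfold PySem.Chars.splitOn
  have hlen : (p ++ '.' :: rest).length + 1 = p.length + 1 + (rest.length + 1) := by simp; omega
  rw [hlen, go_dot p (rest.length + 1) rest [] [] h, go_acc]
  simp

-- The dotted prefixes B yields, expressed on the part list.
def bjoins (parts : List (List Char)) : List (List Char) :=
  (List.range (parts.length - 1)).map (fun k => PySem.Chars.join ['.'] (parts.take (k + 1)))

lemma alt_eq_bjoins (name : String) :
    iter_module_parents_py_alt name
      = (bjoins (PySem.Chars.splitOn name.toList ['.'])).map String.ofList := by
  unfold iter_module_parents_py_alt bjoins
  simp only [PySem.List.pyRange_one, List.map_map]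
  have h1 : ((PySem.Chars.splitOn name.toList ['.']).length - 1 : Int).toNat
      = (PySem.Chars.splitOn name.toList ['.']).length - 1 := by omega
  rw [h1]
  apply List.map_congr_left
  intro k _
  have h2 : ((1:Int) + (k:Int)).toNat = k + 1 := by omega
  simp [Function.comp, h2]

lemma bjoins_cons_cons (p t : List Char) (ts : List (List Char)) :
    bjoins (p :: t :: ts) = p :: (bjoins (t :: ts)).map (fun s => p ++ '.' :: s) := by
  unfold bjoins
  simp only [List.length_cons, Nat.add_sub_cancel, List.range_succ_eq_map, List.map_cons,
    List.map_map]
  congr 1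
  · simp [PySem.Chars.join_singleton]


lemma found_bounds (cs : List Char) (start : Nat) (h : start ≤ cs.length)
    (hne : PySem.Chars.findFrom cs ['.'] (start : Int) none ≠ -1) :
    start ≤ (PySem.Chars.findFrom cs ['.'] (start : Int) none).toNat ∧
      (PySem.Chars.findFrom cs ['.'] (start : Int) none).toNat < cs.length := by
  obtain ⟨h1, h2, -⟩ := PySem.Chars.findFrom_natCast_spec cs ['.'] start h hne
  have h3 : List.drop (PySem.Chars.findFrom cs ['.'] (start : Int) none).toNat cs ≠ [] := by
    intro hnil
    rw [hnil] at h2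
    simp [List.IsPrefix] at h2
  have h4 : (PySem.Chars.findFrom cs ['.'] (start : Int) none).toNat < cs.length := by
    by_contra hge
    exact h3 (List.drop_eq_nil_of_le (by omega))
  exact ⟨by omega, h4⟩

lemma aGo_fuel (f₁ : Nat) : ∀ (f₂ : Nat) (cs : List Char) (start : Nat),
    start ≤ cs.length → cs.length - start < f₁ → cs.length - start < f₂ →
    aGo cs f₁ start = aGo cs f₂ start := by
  induction f₁ with
  | zero => intro f₂ cs start h h₁ h₂; omega
  | succ f₁ ih =>
    intro f₂ cs start h h₁ h₂
    cases f₂ with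
    | zero => omega
    | succ f₂ =>
      show (if PySem.Chars.findFrom cs ['.'] (start : Int) none = -1 then _ else _) = _
      by_cases hidx : PySem.Chars.findFrom cs ['.'] (start : Int) none = -1
      · simp only [aGo, hidx, if_true]
      · obtain ⟨hb1, hb2⟩ := found_bounds cs start h hidx
        simp only [aGo, if_neg hidx]
        rw [ih f₂ cs _ (by omega) (by omega) (by omega)]

lemma aGo_shift (fuel : Nat) : ∀ (p rest : List Char) (j : Nat), j ≤ rest.length →
    aGo (p ++ '.' :: rest) fuel (p.length + 1 + j)
      = (aGo rest fuel j).map (fun t => p ++ '.' :: t) := by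
  induction fuel with
  | zero => intro p rest j hj; simp [aGo]
  | succ fuel ih =>
    intro p rest j hj
    have hlen : (p ++ '.' :: rest).length = p.length + 1 + rest.length := by simp; omega
    have hk : p.length + 1 + j ≤ (p ++ '.' :: rest).length := by omega
    have hdrop : List.drop (p.length + 1 + j) (p ++ '.' :: rest) = List.drop j rest := by
      rw [List.drop_append, List.drop_eq_nil_of_le (by omega : p.length ≤ p.length + 1 + j)]
      have h2 : p.length + 1 + j - p.length = j + 1 := by omega
      rw [h2]
      simp
    have hdrop2 : PySem.Chars.findFrom (p ++ '.' :: rest) ['.'] ((p.length + 1 + j : Nat) : Int) none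
        = if PySem.Chars.find (List.drop j rest) ['.'] = -1 then -1
          else ((p.length + 1 + j : Nat) : Int) + PySem.Chars.find (List.drop j rest) ['.'] := by
      rw [PySem.Chars.findFrom_natCast _ _ _ hk, hdrop]
    have hrest : PySem.Chars.findFrom rest ['.'] ((j : Nat) : Int) none
        = if PySem.Chars.find (List.drop j rest) ['.'] = -1 then -1
          else ((j : Nat) : Int) + PySem.Chars.find (List.drop j rest) ['.'] := by
      rw [PySem.Chars.findFrom_natCast _ _ _ hj]
    by_cases hfind : PySem.Chars.find (List.drop j rest) ['.'] = -1
    · simp only [aGo, hdrop2, hrest, hfind, if_pos, List.map_nil]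
    · set d := PySem.Chars.find (List.drop j rest) ['.'] with hd
      have hd0 : 0 ≤ d := by
        have := PySem.Chars.neg_one_le_find (List.drop j rest) ['.']
        omega
      have hspec := PySem.Chars.find_spec (s := List.drop j rest) (sub := ['.']) (by omega)
      have hdlt : d.toNat < (List.drop j rest).length := by
        obtain ⟨hpre, -⟩ := hspec
        obtain ⟨t, ht⟩ := hpre
        by_contra hge
        rw [List.drop_eq_nil_of_le (by omega)] at ht
        simp at ht
      have hdroplen : (List.drop j rest).length = rest.length - j := by simp
      -- the two idx values
      have hidx1 : PySem.Chars.findFrom (p ++ '.' :: rest) ['.'] ((p.length + 1 + j : Nat) : Int) none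
          = ((p.length + 1 + j : Nat) : Int) + d := by rw [hdrop2, if_neg hfind]
      have hidx2 : PySem.Chars.findFrom rest ['.'] ((j : Nat) : Int) none
          = ((j : Nat) : Int) + d := by rw [hrest, if_neg hfind]
      have hne1 : ¬ (((p.length + 1 + j : Nat) : Int) + d = -1) := by omega
      have hne2 : ¬ (((j : Nat) : Int) + d = -1) := by omega
      have ht1 : (((p.length + 1 + j : Nat) : Int) + d).toNat = p.length + 1 + (j + d.toNat) := by omega
      have ht2 : (((j : Nat) : Int) + d).toNat = j + d.toNat := by omega
      have htake : List.take (p.length + 1 + (j + d.toNat)) (p ++ '.' :: rest)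
          = p ++ '.' :: List.take (j + d.toNat) rest := by
        rw [List.take_append, List.take_of_length_le (by omega : p.length ≤ p.length + 1 + (j + d.toNat))]
        have h5 : p.length + 1 + (j + d.toNat) - p.length = (j + d.toNat) + 1 := by omega
        rw [h5]
        simp
      have hjd : j + d.toNat + 1 ≤ rest.length := by omega
      show (if _ = -1 then _ else _) = _
      rw [hidx1]
      conv_rhs => rw [show aGo rest (fuel+1) j = if PySem.Chars.findFrom rest ['.'] ((j:Nat):Int) none = -1 then [] else rest.take (PySem.Chars.findFrom rest ['.'] ((j:Nat):Int) none).toNat :: aGo rest fuel ((PySem.Chars.findFrom rest ['.'] ((j:Nat):Int) none).toNat + 1) from rfl]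
      rw [hidx2, if_neg hne1, if_neg hne2, ht1, ht2, htake]
      simp only [List.map_cons]
      congr 1
      have harg : j + d.toNat + 1 = j + (d.toNat + 1) := by omega
      have := ih p rest (j + d.toNat + 1) hjd
      rw [show p.length + 1 + (j + d.toNat) + 1 = p.length + 1 + (j + d.toNat + 1) from by omega]
      exact this

-- decomposition at the first dot
lemma find_decomp (cs : List Char) (h : PySem.Chars.find cs ['.'] ≠ -1) :
    '.' ∉ cs.take (PySem.Chars.find cs ['.']).toNat ∧
      (cs.take (PySem.Chars.find cs ['.']).toNat).length = (PySem.Chars.find cs ['.']).toNat ∧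
      cs = cs.take (PySem.Chars.find cs ['.']).toNat
            ++ '.' :: cs.drop ((PySem.Chars.find cs ['.']).toNat + 1) := by
  have h0 : 0 ≤ PySem.Chars.find cs ['.'] := by
    have := PySem.Chars.neg_one_le_find cs ['.']
    omega
  set k := (PySem.Chars.find cs ['.']).toNat with hk
  obtain ⟨hpre, hmin⟩ := PySem.Chars.find_spec (s := cs) (sub := ['.']) h0
  obtain ⟨t, ht⟩ := hpre
  have hklt : k < cs.length := by
    by_contra hge
    rw [List.drop_eq_nil_of_le (by omega)] at ht
    simp at ht
  have hdropk : List.drop k cs = '.' :: List.drop (k + 1) cs := by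
    rw [← ht]
    have h1 : t = List.drop (k + 1) cs := by
      simpa [List.drop_drop] using congrArg (List.drop 1) ht
    rw [h1]
    rfl
  refine ⟨?_, by simp; omega, ?_⟩
  · intro hmem
    obtain ⟨i, hi, hget⟩ := List.mem_iff_getElem.mp hmem
    have hilt : i < k := by
      have := hi
      simp at this
      omega
    apply hmin i hilt
    have hic : i < cs.length := by omega
    rw [List.drop_eq_getElem_cons hic]
    have : cs[i] = '.' := by
      rw [← hget, List.getElem_take]
    rw [this]
    exact ⟨List.drop (i+1) cs, rfl⟩
  · conv_lhs => rw [← List.take_append_drop k cs]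
    rw [hdropk]

-- main equivalence on char lists
lemma main_eq (n : Nat) : ∀ cs : List Char, cs.length ≤ n →
    aGo cs (cs.length + 1) 0 = bjoins (PySem.Chars.splitOn cs ['.']) := by
  induction n with
  | zero =>
    intro cs hcs
    have : cs = [] := List.length_eq_zero_iff.mp (by omega)
    subst this
    decide
  | succ n ih =>
    intro cs hcs
    by_cases hfind : PySem.Chars.find cs ['.'] = -1
    · -- no dot: both are empty
      have hnd : '.' ∉ cs := by
        intro hmem
        obtain ⟨i, hi, hget⟩ := List.mem_iff_getElem.mp hmem
        have : ['.'] <:+: cs := by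
          refine ⟨cs.take i, cs.drop (i+1), ?_⟩
          rw [← hget, List.append_assoc]
          simp only [List.singleton_append]
          rw [← List.drop_eq_getElem_cons hi]
          exact List.take_append_drop i cs
        exact ((PySem.Chars.find_eq_neg_one_iff cs ['.']).mp hfind) this
      have hA : aGo cs (cs.length + 1) 0 = [] := by
        show (if _ = -1 then _ else _) = _
        rw [show ((0:Nat):Int) = (0:Int) from rfl, PySem.Chars.findFrom_zero, hfind]
        simp
      rw [hA, splitOn_nodot cs hnd]
      rfl
    · -- a first dot exists: decompose cs = p ++ '.' :: rest
      obtain ⟨hnp, hplen, hdec⟩ := find_decomp cs hfind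
      set k := (PySem.Chars.find cs ['.']).toNat with hk
      set p := cs.take k with hp
      set rest := cs.drop (k + 1) with hrest
      have hklt : k < cs.length := by
        have : (cs.take k).length ≤ cs.length := by simp
        have hlen2 := congrArg List.length hdec
        simp at hlen2
        omega
      have hrl : rest.length = cs.length - (k + 1) := by simp [hrest]
      -- A side, first step
      have hA : aGo cs (cs.length + 1) 0
          = p :: aGo cs cs.length (k + 1) := by
        show (if _ = -1 then _ else _) = _
        rw [show ((0:Nat):Int) = (0:Int) from rfl, PySem.Chars.findFrom_zero]
        rw [if_neg hfind]
      -- shift to the rest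
      have hpl : p.length = k := hplen
      have hshift : aGo cs cs.length (k + 1)
          = (aGo rest cs.length 0).map (fun t => p ++ '.' :: t) := by
        have hs := aGo_shift cs.length p rest 0 (Nat.zero_le _)
        rw [← hdec] at hs
        rw [show p.length + 1 + 0 = k + 1 from by omega] at hs
        exact hs
      have hfuel : aGo rest cs.length 0 = aGo rest (rest.length + 1) 0 :=
        aGo_fuel cs.length (rest.length + 1) rest 0 (Nat.zero_le _) (by omega) (by omega)
      have hih : aGo rest (rest.length + 1) 0 = bjoins (PySem.Chars.splitOn rest ['.']) :=
        ih rest (by omega)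
      -- B side
      have hB : PySem.Chars.splitOn cs ['.'] = p :: PySem.Chars.splitOn rest ['.'] := by
        conv_lhs => rw [hdec]
        exact splitOn_dot p rest hnp
      obtain ⟨t, ts, hts⟩ : ∃ t ts, PySem.Chars.splitOn rest ['.'] = t :: ts := by
        cases hsp : PySem.Chars.splitOn rest ['.'] with
        | nil => exact absurd hsp (by unfold PySem.Chars.splitOn; exact go_ne_nil _ _ _ _)
        | cons t ts => exact ⟨t, ts, rfl⟩
      rw [hA, hshift, hfuel, hih, hB, hts, bjoins_cons_cons]

-- ===== VERDICT (by name: the statement is the Claim_ definition above) =====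
theorem iter_module_parents_py_spec : Claim_equal_iter_module_parents_py := by
  intro name _
  unfold Spec_iter_module_parents_py iter_module_parents_py
  rw [alt_eq_bjoins, main_eq name.toList.length name.toList le_rfl]
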